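-- pv_equiv track=rewrite | github.com/selambeyu/data-contract-enforcer | src/contracts/attributor.py | _compute_contamination_depths
-- ===== SOURCE A (Python) =====
-- from collections import deque
--
-- def _compute_contamination_depths(
--     producer_contract_id: str,
--     subscriber_ids: list[str],
--     snapshot: dict,
-- ) -> dict[str, int]:
--     """
--     For each subscriber_id, compute the minimum BFS hop distance from the
--     producer node (identified by producer_contract_id) to that subscriber
--     through the lineage graph.
--
--     Returns {subscriber_id: depth} where depth >= 1.
--     depth=1 means the subscriber is directly connected to the producer.
--     depth=N means there are N-1 intermediate system hops between them.
--
--     If the subscriber cannot be found in the lineage graph, defaults to 1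
--     (direct connection assumed — conservative estimate).
--
--     contamination_depth lets downstream tooling quantify propagation severity:
--     a violation at depth=1 is contained; at depth=3 it has crossed three
--     system boundaries and is significantly harder to roll back.
--     """
--     if not snapshot or not subscriber_ids:
--         return {sid: 1 for sid in subscriber_ids}
--
--     nodes_by_id   = {n["node_id"]: n for n in snapshot.get("nodes", [])}
--     edges          = snapshot.get("edges", [])
--
--     # Build forward adjacency (producer → consumers)
--     forward_adj: dict[str, list[str]] = {}
--     for edge in edges:
--         rel = edge.get("relationship", "")
--         if rel in ("PRODUCES", "WRITES", "CONSUMES", "READS"):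
--             src = edge.get("source", "")
--             tgt = edge.get("target", "")
--             if src and tgt:
--                 forward_adj.setdefault(src, []).append(tgt)
--
--     # Find seed nodes whose label or node_id contains the producer contract ID
--     # Strip hyphens for fuzzy matching (week3-document-refinery → week3 document refinery)
--     id_stem = producer_contract_id.lower().replace("-", "").replace("_", "")
--     seed_nodes = [
--         nid for nid, n in nodes_by_id.items()
--         if (
--             id_stem in nid.lower().replace("-", "").replace("_", "")
--             or id_stem in n.get("label", "").lower().replace("-", "").replace("_", "")
--         )
--     ]
--     if not seed_nodes:
--         # No node found for producer — return default depth=1 for all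
--         return {sid: 1 for sid in subscriber_ids}
--
--     # BFS forward from producer seeds; record depth at which each node_id is reached
--     visited: dict[str, int] = {}   # node_id → depth
--     queue: deque[tuple[str, int]] = deque()
--     for nid in seed_nodes:
--         queue.append((nid, 0))
--
--     while queue:
--         node_id, depth = queue.popleft()
--         if node_id in visited:
--             continue
--         visited[node_id] = depth
--         for nxt in forward_adj.get(node_id, []):
--             if nxt not in visited:
--                 queue.append((nxt, depth + 1))
--
--     # Map each subscriber_id to its reached depth (default 1 if not found)
--     result: dict[str, int] = {}
--     for sid in subscriber_ids:
--         if sid in visited: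
--             # depth=0 means it is the producer itself; consumers start at depth>=1
--             result[sid] = max(1, visited[sid])
--         else:
--             # Subscriber not found in graph — try partial label match
--             matched_depth = None
--             sid_stem = sid.lower().replace("-", "").replace("_", "")
--             for nid, depth in visited.items():
--                 nid_stem = nid.lower().replace("-", "").replace("_", "")
--                 lbl_stem = nodes_by_id.get(nid, {}).get("label", "").lower().replace("-", "").replace("_", "")
--                 if sid_stem in nid_stem or sid_stem in lbl_stem:
--                     matched_depth = max(1, depth)
--                     break
--             result[sid] = matched_depth if matched_depth is not None else 1
--
--     return result
-- ===== SOURCE B (Python) =====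
-- def _compute_contamination_depths(
--     producer_contract_id: str,
--     subscriber_ids: list[str],
--     snapshot: dict,
-- ) -> dict[str, int]:
--     if not snapshot or not subscriber_ids:
--         return {sid: 1 for sid in subscriber_ids}
--
--     def stem(s):
--         return s.lower().replace("-", "").replace("_", "")
--
--     nodes_by_id = {n["node_id"]: n for n in snapshot.get("nodes", [])}
--
--     # Flat filtered edge list; no adjacency index is built.
--     fedges = [(e.get("source", ""), e.get("target", ""))
--               for e in snapshot.get("edges", [])
--               if e.get("relationship", "") in ("PRODUCES", "WRITES", "CONSUMES", "READS")
--               and e.get("source", "") and e.get("target", "")]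
--
--     id_stem = stem(producer_contract_id)
--     dist = {nid: 0 for nid, n in nodes_by_id.items()
--             if id_stem in stem(nid) or id_stem in stem(n.get("label", ""))}
--     if not dist:
--         return {sid: 1 for sid in subscriber_ids}
--
--     # Round-based edge relaxation (Bellman-Ford style): round r scans the whole
--     # edge list once and discovers every node at hop distance r+1.
--     r = 0
--     while True:
--         newly = {tgt: r + 1 for src, tgt in fedges
--                  if dist.get(src) == r and tgt not in dist}
--         if not newly:
--             break
--         dist.update(newly)
--         r += 1
--
--     result = {}
--     for sid in subscriber_ids:
--         if sid in dist:
--             result[sid] = max(1, dist[sid])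
--         else:
--             s = stem(sid)
--             cand = [max(1, d) for nid, d in dist.items()
--                     if s in stem(nid) or s in stem(nodes_by_id.get(nid, {}).get("label", ""))]
--             result[sid] = min(cand) if cand else 1
--     return result
-- ===== Notes on version B (the rewrite author's own statement) =====
-- stated objective: alternative
-- what changed: B drops A's adjacency dict and deque entirely: it keeps a flat filtered (source,target) edge list and computes depths by round-based whole-edge-list relaxation (Bellman-Ford style, one full edge scan per hop level), and replaces A's first-match fallback loop over the BFS-ordered visited dict with an order-independent min over all matching reached nodes (equal because A's visited dict is depth-sorted, so its first match attains the minimum depth).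
import Mathlib
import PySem

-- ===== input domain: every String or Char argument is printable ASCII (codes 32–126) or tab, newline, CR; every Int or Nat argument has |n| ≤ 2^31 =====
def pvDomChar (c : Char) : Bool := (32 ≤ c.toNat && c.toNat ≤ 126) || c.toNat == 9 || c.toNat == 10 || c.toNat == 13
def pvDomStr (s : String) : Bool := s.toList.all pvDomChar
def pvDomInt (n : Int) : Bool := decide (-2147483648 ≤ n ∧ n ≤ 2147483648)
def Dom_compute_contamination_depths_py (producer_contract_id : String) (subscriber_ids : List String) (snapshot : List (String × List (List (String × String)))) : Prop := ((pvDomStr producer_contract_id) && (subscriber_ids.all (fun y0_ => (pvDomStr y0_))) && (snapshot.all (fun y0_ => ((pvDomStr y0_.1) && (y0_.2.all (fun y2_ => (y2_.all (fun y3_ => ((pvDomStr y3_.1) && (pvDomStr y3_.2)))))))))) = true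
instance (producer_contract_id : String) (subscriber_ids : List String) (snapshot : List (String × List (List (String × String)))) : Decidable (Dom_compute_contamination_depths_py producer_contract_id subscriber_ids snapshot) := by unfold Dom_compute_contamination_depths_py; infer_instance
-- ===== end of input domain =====

-- B replaces A's adjacency-dict + deque BFS with round-based whole-edge-list relaxation
-- (Bellman-Ford style) over a flat filtered edge list, and A's first-match fallback loop
-- with an order-independent min over all matching visited nodes; same return value (alternative).


-- ===== PORT A =====
-- helpers for the lines both Python versions share verbatim (stemming, node index,
-- seed predicate, fallback match predicate, the depth-1 default dict)

-- s.lower().replace("-", "").replace("_", "")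
def pvStem (s : String) : String :=
  PySem.Str.replace (PySem.Str.replace (PySem.Str.lower s) "-" "") "_" ""

-- {sid: 1 for sid in subscriber_ids}
def pvDefaultDepths (subscriber_ids : List String) : List (String × Int) :=
  (subscriber_ids.foldl (fun d sid => d.insert sid 1) PySem.Dict.empty).items

-- {n["node_id"]: n for n in snapshot.get("nodes", [])}  (total form: a missing "node_id"
-- reads ""; Python raises KeyError there — excluded by Pre_)
def pvNodesById (nodes : List (List (String × String))) :
    PySem.Dict String (PySem.Dict String String) :=
  nodes.foldl
    (fun d n => d.insert (((PySem.Dict.mk n).get? "node_id").getD "") (PySem.Dict.mk n))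
    PySem.Dict.empty

-- id_stem in stem(nid) or id_stem in stem(n.get("label", ""))
def pvSeedPred (idStem : String) (p : String × PySem.Dict String String) : Bool :=
  PySem.Str.isIn idStem (pvStem p.1) ||
  PySem.Str.isIn idStem (pvStem (p.2.getD "label" ""))

-- sid_stem in stem(nid) or sid_stem in stem(nodes_by_id.get(nid, {}).get("label", ""))
def pvMatchPred (sidStem : String) (nodesById : PySem.Dict String (PySem.Dict String String))
    (nid : String) : Bool :=
  PySem.Str.isIn sidStem (pvStem nid) ||
  PySem.Str.isIn sidStem (pvStem ((nodesById.getD nid PySem.Dict.empty).getD "label" ""))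

-- the body of A's forward-adjacency loop
def pvAdjStep (d : PySem.Dict String (List String)) (e : List (String × String)) :
    PySem.Dict String (List String) :=
  let ed := PySem.Dict.mk e
  let rel := ed.getD "relationship" ""
  if rel == "PRODUCES" || rel == "WRITES" || rel == "CONSUMES" || rel == "READS" then
    let src := ed.getD "source" ""
    let tgt := ed.getD "target" ""
    if src ≠ "" ∧ tgt ≠ "" then d.insert src (d.getD src [] ++ [tgt]) else d
  else d

def pvBuildAdj (edges : List (List (String × String))) : PySem.Dict String (List String) :=
  edges.foldl pvAdjStep PySem.Dict.empty

-- the seed_nodes comprehension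
def pvSeeds (idStem : String) (nodesById : PySem.Dict String (PySem.Dict String String)) :
    List String :=
  (nodesById.items.filter (pvSeedPred idStem)).map (·.1)

-- A's queue BFS: one dequeue per step; fuel bounds the number of dequeues
-- (the caller supplies #seeds + #edges, which is enough)
def pvBfsA (adj : PySem.Dict String (List String)) :
    Nat → List (String × Int) → PySem.Dict String Int → PySem.Dict String Int
  | 0, _, v => v
  | _ + 1, [], v => v
  | f + 1, (node, d) :: q, v =>
      if v.contains node then pvBfsA adj f q v
      else
        let v' := v.insert node d
        let news := (adj.getD node []).filter (fun t => !(v'.contains t))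
        pvBfsA adj f (q ++ news.map (fun t => (t, d + 1))) v'

-- A's fallback loop over visited.items with break
def pvFallbackA (sidStem : String) (nodesById : PySem.Dict String (PySem.Dict String String)) :
    List (String × Int) → Option Int
  | [] => none
  | (nid, depth) :: rest =>
      if pvMatchPred sidStem nodesById nid then some (max 1 depth)
      else pvFallbackA sidStem nodesById rest

-- A's result loop
def pvResultA (subscriber_ids : List String) (visited : PySem.Dict String Int)
    (nodesById : PySem.Dict String (PySem.Dict String String)) : List (String × Int) :=
  (subscriber_ids.foldl
    (fun r sid =>
      if visited.contains sid then r.insert sid (max 1 (visited.getD sid 0))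
      else r.insert sid ((pvFallbackA (pvStem sid) nodesById visited.items).getD 1))
    PySem.Dict.empty).items

def compute_contamination_depths_py (producer_contract_id : String) (subscriber_ids : List String) (snapshot : List (String × List (List (String × String)))) : List (String × Int) :=
  if snapshot = [] ∨ subscriber_ids = [] then pvDefaultDepths subscriber_ids
  else
    let snap := PySem.Dict.mk snapshot
    let nodesById := pvNodesById (snap.getD "nodes" [])
    let edges := snap.getD "edges" []
    let adj := pvBuildAdj edges
    let idStem := pvStem producer_contract_id
    let seeds := pvSeeds idStem nodesById
    if seeds = [] then pvDefaultDepths subscriber_ids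
    else
      let visited :=
        pvBfsA adj (seeds.length + edges.length)
          (seeds.map (fun s => (s, (0 : Int)))) PySem.Dict.empty
      pvResultA subscriber_ids visited nodesById

-- ===== PORT B =====
-- B builds no adjacency index: a flat filtered (source, target) edge list
def pvEdgeOk (e : List (String × String)) : Bool :=
  let ed := PySem.Dict.mk e
  let rel := ed.getD "relationship" ""
  (rel == "PRODUCES" || rel == "WRITES" || rel == "CONSUMES" || rel == "READS")
    && !(ed.getD "source" "" == "") && !(ed.getD "target" "" == "")

def pvFEdges (edges : List (List (String × String))) : List (String × String) :=
  (edges.filter pvEdgeOk).map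
    (fun e => ((PySem.Dict.mk e).getD "source" "", (PySem.Dict.mk e).getD "target" ""))

-- dist = {nid: 0 for matching nodes}
def pvDist0 (idStem : String) (nodesById : PySem.Dict String (PySem.Dict String String)) :
    PySem.Dict String Int :=
  (nodesById.items.filter (pvSeedPred idStem)).foldl
    (fun d p => d.insert p.1 0) PySem.Dict.empty

-- newly = {tgt: r + 1 for src, tgt in fedges if dist.get(src) == r and tgt not in dist}
def pvNewly (fedges : List (String × String)) (dist : PySem.Dict String Int) (r : Int) :
    PySem.Dict String Int :=
  (fedges.filter (fun st => dist.get? st.1 == some r && !(dist.contains st.2))).foldl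
    (fun d st => d.insert st.2 (r + 1)) PySem.Dict.empty

-- the while-True relaxation loop; fuel = #fedges + 1 always reaches the break
def pvRelax (fedges : List (String × String)) :
    Nat → PySem.Dict String Int → Int → PySem.Dict String Int
  | 0, dist, _ => dist
  | f + 1, dist, r =>
      let newly := pvNewly fedges dist r
      if newly.items = [] then dist
      else pvRelax fedges f (newly.items.foldl (fun d p => d.insert p.1 p.2) dist) (r + 1)

-- per-subscriber value: direct lookup, else min over all matching visited nodes
def pvDepthForB (sid : String) (dist : PySem.Dict String Int)
    (nodesById : PySem.Dict String (PySem.Dict String String)) : Int :=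
  if dist.contains sid then max 1 (dist.getD sid 0)
  else
    let cand := (dist.items.filter (fun p => pvMatchPred (pvStem sid) nodesById p.1)).map
      (fun p => max 1 p.2)
    if cand = [] then 1 else (PySem.List.min? cand (fun x => x)).getD 1

def compute_contamination_depths_py_alt (producer_contract_id : String) (subscriber_ids : List String) (snapshot : List (String × List (List (String × String)))) : List (String × Int) :=
  if snapshot = [] ∨ subscriber_ids = [] then pvDefaultDepths subscriber_ids
  else
    let snap := PySem.Dict.mk snapshot
    let nodesById := pvNodesById (snap.getD "nodes" [])
    let fedges := pvFEdges (snap.getD "edges" [])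
    let idStem := pvStem producer_contract_id
    let dist0 := pvDist0 idStem nodesById
    if dist0.items = [] then pvDefaultDepths subscriber_ids
    else
      let dist := pvRelax fedges (fedges.length + 1) dist0 0
      (subscriber_ids.foldl
        (fun r sid => r.insert sid (pvDepthForB sid dist nodesById))
        PySem.Dict.empty).items

-- ===== PRECONDITION & SPEC =====
-- Pre_ excludes exactly the inputs where the Python raises KeyError: a non-empty snapshot
-- and subscriber list with some node dict lacking the "node_id" key (A and B both raise there).
def Pre_compute_contamination_depths_py (producer_contract_id : String) (subscriber_ids : List String) (snapshot : List (String × List (List (String × String)))) : Prop :=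
  snapshot = [] ∨ subscriber_ids = [] ∨
    ∀ n ∈ (PySem.Dict.mk snapshot).getD "nodes" [], ((PySem.Dict.mk n).get? "node_id").isSome
instance (producer_contract_id : String) (subscriber_ids : List String) (snapshot : List (String × List (List (String × String)))) : Decidable (Pre_compute_contamination_depths_py producer_contract_id subscriber_ids snapshot) := by unfold Pre_compute_contamination_depths_py; infer_instance

def pvWitness_compute_contamination_depths_py : String × List String × (List (String × List (List (String × String)))) :=
  ("doc", ["s1", "s2"],
   [("nodes", [[("node_id", "doc-1"), ("label", "Doc")], [("node_id", "s1")]]),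
    ("edges", [[("relationship", "PRODUCES"), ("source", "doc-1"), ("target", "s1")]])])

def Spec_compute_contamination_depths_py (producer_contract_id : String) (subscriber_ids : List String) (snapshot : List (String × List (List (String × String)))) (out : List (String × Int)) : Prop := out = compute_contamination_depths_py_alt producer_contract_id subscriber_ids snapshot
instance (producer_contract_id : String) (subscriber_ids : List String) (snapshot : List (String × List (List (String × String)))) (out : List (String × Int)) : Decidable (Spec_compute_contamination_depths_py producer_contract_id subscriber_ids snapshot out) := by unfold Spec_compute_contamination_depths_py; infer_instance

-- ===== CLAIM (what is proved, stated in full; the proofs are below) =====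
def Claim_equal_compute_contamination_depths_py : Prop := ∀ (producer_contract_id : String) (subscriber_ids : List String) (snapshot : List (String × List (List (String × String)))), Dom_compute_contamination_depths_py producer_contract_id subscriber_ids snapshot → Pre_compute_contamination_depths_py producer_contract_id subscriber_ids snapshot → Spec_compute_contamination_depths_py producer_contract_id subscriber_ids snapshot (compute_contamination_depths_py producer_contract_id subscriber_ids snapshot)

-- ===== LEMMAS AND PROOFS =====

-- The bridge between the two BFS formulations is a level-synchronous BFS (frontier +
-- depth), used ONLY in the proofs: A's queue BFS equals it, and its visited map equals
-- B's relaxation fixpoint.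

-- one level pass: visit each still-unseen frontier node at this depth and gather its
-- still-unseen forward neighbours; returns (visited', next frontier)
def pvStepB (adj : PySem.Dict String (List String)) (depth : Int) :
    List String → PySem.Dict String Int → PySem.Dict String Int × List String
  | [], v => (v, [])
  | node :: rest, v =>
      if v.contains node then pvStepB adj depth rest v
      else
        let v' := v.insert node depth
        let news := (adj.getD node []).filter (fun t => !(v'.contains t))
        let res := pvStepB adj depth rest v'
        (res.1, news ++ res.2)

def pvBfsB (adj : PySem.Dict String (List String)) :
    Nat → List String → Int → PySem.Dict String Int → PySem.Dict String Int
  | 0, _, _, v => v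
  | _ + 1, [], _, v => v
  | f + 1, frontier, depth, v =>
      let res := pvStepB adj depth frontier v
      pvBfsB adj f res.2 (depth + 1) res.1

-- remaining weight: total length of the adjacency lists of not-yet-visited keys
def pvWgt (v : PySem.Dict String Int) (l : List (String × List String)) : Nat :=
  ((l.filter (fun kv => (v.get? kv.1).isNone)).map (fun kv => kv.2.length)).sum

theorem pvWgt_nil (v : PySem.Dict String Int) : pvWgt v [] = 0 := rfl

theorem pvWgt_cons (v : PySem.Dict String Int) (kv : String × List String)
    (l : List (String × List String)) :
    pvWgt v (kv :: l) = (if (v.get? kv.1).isNone then kv.2.length else 0) + pvWgt v l := by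
  by_cases h : (v.get? kv.1).isNone <;> simp [pvWgt, h]

theorem pvWgt_insert_le (l : List (String × List String)) (v : PySem.Dict String Int)
    (node : String) (d : Int) : pvWgt (v.insert node d) l ≤ pvWgt v l := by
  induction l with
  | nil => simp [pvWgt_nil]
  | cons kv rest ih =>
    rw [pvWgt_cons, pvWgt_cons]
    have h : (if ((v.insert node d).get? kv.1).isNone then kv.2.length else 0) ≤
        (if (v.get? kv.1).isNone then kv.2.length else 0) := by
      by_cases hk : kv.1 = node
      · subst hk; simp [PySem.Dict.get?_insert_self]
      · rw [PySem.Dict.get?_insert_of_ne v d hk]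
    omega

-- visiting an unvisited node removes at least its adjacency list from the weight
theorem pvWgt_visit (l : List (String × List String)) (v : PySem.Dict String Int)
    (node : String) (d : Int) (hn : (l.map Prod.fst).Nodup) (hc : v.get? node = none) :
    ((PySem.Dict.mk l).getD node []).length + pvWgt (v.insert node d) l ≤ pvWgt v l := by
  induction l with
  | nil =>
    have h0 : (PySem.Dict.mk ([] : List (String × List String))).getD node [] = [] := rfl
    simp [h0, pvWgt_nil]
  | cons kv rest ih =>
    rw [pvWgt_cons, pvWgt_cons, PySem.Dict.getD_eq_get?_getD, PySem.Dict.get?_mk_cons]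
    by_cases hk : kv.1 = node
    · subst hk
      simp only [BEq.rfl, if_true, hc, Option.isNone_none, PySem.Dict.get?_insert_self,
        Option.isNone_some, Bool.false_eq_true, if_false, Option.getD_some]
      have hmono := pvWgt_insert_le rest v kv.1 d
      omega
    · have hbeq : (kv.1 == node) = false := by simp [hk]
      rw [hbeq]
      simp only [Bool.false_eq_true, if_false]
      rw [PySem.Dict.get?_insert_of_ne v d hk, ← PySem.Dict.getD_eq_get?_getD]
      have ih' := ih (List.Nodup.of_cons (by simpa using hn))
      omega

-- one level pass cannot increase (frontier size + weight)
theorem pvStepB_wgt (adj : PySem.Dict String (List String)) (d : Int)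
    (rest : List String) (v : PySem.Dict String Int) (hn : (adj.items.map Prod.fst).Nodup) :
    (pvStepB adj d rest v).2.length + pvWgt (pvStepB adj d rest v).1 adj.items ≤
      pvWgt v adj.items := by
  induction rest generalizing v with
  | nil => simp [pvStepB]
  | cons node rest ih =>
    simp only [pvStepB]
    cases hc : v.contains node with
    | true => simpa using ih v
    | false =>
      have hget : v.get? node = none := by
        have h := PySem.Dict.contains_eq_isSome_get? v node
        rw [hc] at h
        cases hx : v.get? node <;> simp [hx] at h ⊢
      have hvisit := pvWgt_visit adj.items v node d hn hget
      have hfil : ((adj.getD node []).filter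
          (fun t => !((v.insert node d).contains t))).length ≤ (adj.getD node []).length :=
        List.length_filter_le _ _
      have hadj : (PySem.Dict.mk adj.items) = adj := rfl
      rw [hadj] at hvisit
      have ih' := ih (v.insert node d)
      simp only [Bool.false_eq_true, if_false, List.length_append]
      omega

theorem pvBfsA_nil (adj : PySem.Dict String (List String)) (f : Nat)
    (v : PySem.Dict String Int) : pvBfsA adj f [] v = v := by
  cases f <;> rfl

-- running the queue BFS through one frontier (queued at depth d) = one pvStepB pass
theorem pvBfsA_level (adj : PySem.Dict String (List String)) (d : Int) :
    ∀ (rest : List String) (f : Nat) (tail : List (String × Int)) (v : PySem.Dict String Int),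
      rest.length ≤ f →
      pvBfsA adj f (rest.map (fun x => (x, d)) ++ tail) v =
        pvBfsA adj (f - rest.length)
          (tail ++ (pvStepB adj d rest v).2.map (fun x => (x, d + 1)))
          (pvStepB adj d rest v).1 := by
  intro rest
  induction rest with
  | nil => intro f tail v _; simp [pvStepB]
  | cons node rest ih =>
    intro f tail v hf
    have hlen : (node :: rest).length = rest.length + 1 := rfl
    obtain ⟨f', rfl⟩ : ∃ f', f = f' + 1 := ⟨f - 1, by omega⟩
    rw [List.map_cons, List.cons_append]
    simp only [pvBfsA, pvStepB]
    cases hc : v.contains node with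
    | true =>
      simp only [if_true]
      rw [ih f' tail v (by omega)]
      congr 1
      omega
    | false =>
      simp only [Bool.false_eq_true, if_false]
      rw [List.append_assoc]
      rw [ih f' (tail ++ (((adj.getD node []).filter
            (fun t => !((v.insert node d).contains t))).map (fun t => (t, d + 1))))
          (v.insert node d) (by omega)]
      rw [List.map_append, ← List.append_assoc]
      congr 1
      omega

-- the queue BFS and the level BFS agree given enough fuel on both sides
theorem pvBfs_eq (adj : PySem.Dict String (List String))
    (hn : (adj.items.map Prod.fst).Nodup) :
    ∀ (g f : Nat) (frontier : List String) (d : Int) (v : PySem.Dict String Int),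
      frontier.length + pvWgt v adj.items ≤ f →
      frontier.length + pvWgt v adj.items ≤ g →
      pvBfsA adj f (frontier.map (fun x => (x, d))) v = pvBfsB adj g frontier d v := by
  intro g
  induction g with
  | zero =>
    intro f frontier d v _ hg
    have hfr : frontier = [] := by
      cases frontier with
      | nil => rfl
      | cons a l => simp [List.length_cons] at hg
    subst hfr
    simp [pvBfsA_nil, pvBfsB]
  | succ g ih =>
    intro f frontier d v hf hg
    cases frontier with
    | nil => simp [pvBfsA_nil, pvBfsB]
    | cons node rest =>
      have hflen : (node :: rest).length = rest.length + 1 := rfl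
      have hlev := pvBfsA_level adj d (node :: rest) f [] v (by omega)
      rw [List.append_nil, List.nil_append] at hlev
      rw [hlev]
      have hw := pvStepB_wgt adj d (node :: rest) v hn
      rw [ih (f - (node :: rest).length)
          (pvStepB adj d (node :: rest) v).2 (d + 1) (pvStepB adj d (node :: rest) v).1
          (by omega) (by omega)]
      rfl

-- === adjacency building: keys stay unique and the total weight grows by ≤ 1 per edge ===

theorem pvWgt_empty_eq_sum (l : List (String × List String)) :
    pvWgt PySem.Dict.empty l = (l.map (fun kv => kv.2.length)).sum := by
  simp [pvWgt, PySem.Dict.get?_empty]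

theorem pvSumReplace (src tgt : String) :
    ∀ (l : List (String × List String)), (l.map Prod.fst).Nodup →
      ∀ val, (PySem.Dict.mk l).get? src = some val →
      ((l.map (fun p => if p.1 == src then (src, val ++ [tgt]) else p)).map
          (fun kv => kv.2.length)).sum =
        ((l.map (fun kv => kv.2.length)).sum) + 1 := by
  intro l
  induction l with
  | nil =>
    intro _ val h
    have h0 : (PySem.Dict.mk ([] : List (String × List String))).get? src = none := rfl
    rw [h0] at h
    cases h
  | cons kv rest ih =>
    intro hn val h
    rw [PySem.Dict.get?_mk_cons] at h
    by_cases hk : kv.1 = src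
    · have hbeq : (kv.1 == src) = true := by simp [hk]
      rw [hbeq] at h
      simp only [if_true] at h
      obtain rfl : kv.2 = val := by cases h; rfl
      have hn' : (kv.1 :: rest.map Prod.fst).Nodup := by
        rw [List.map_cons] at hn; exact hn
      obtain ⟨hhead, -⟩ := List.nodup_cons.mp hn'
      have hrest : rest.map (fun p => if p.1 == src then (src, kv.2 ++ [tgt]) else p) = rest := by
        conv_rhs => rw [← List.map_id rest]
        apply List.map_congr_left
        intro p hp
        have hne : (p.1 == src) = false := by
          apply beq_eq_false_iff_ne.mpr
          intro hps
          apply hhead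
          rw [hk, ← hps]
          exact List.mem_map_of_mem hp
        simp [hne]
      simp only [List.map_cons, hbeq, if_true, List.sum_cons, hrest]
      simp [List.length_append]
      omega
    · have hbeq : (kv.1 == src) = false := by simp [hk]
      rw [hbeq] at h
      simp only [Bool.false_eq_true, if_false] at h
      have ih' := ih (List.Nodup.of_cons (by simpa using hn)) val h
      simp only [List.map_cons, hbeq, Bool.false_eq_true, if_false, List.sum_cons]
      omega

theorem pvWgt_empty_insert (d : PySem.Dict String (List String)) (src tgt : String)
    (hn : d.keys.Nodup) :
    pvWgt PySem.Dict.empty (d.insert src (d.getD src [] ++ [tgt])).items ≤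
      pvWgt PySem.Dict.empty d.items + 1 := by
  cases hc : d.contains src with
  | false =>
    rw [PySem.Dict.items_insert_of_not_contains d _ hc, PySem.Dict.getD_of_not_contains d _ hc]
    rw [pvWgt_empty_eq_sum, pvWgt_empty_eq_sum]
    simp
  | true =>
    obtain ⟨val, hval⟩ : ∃ val, d.get? src = some val := by
      have h := PySem.Dict.contains_eq_isSome_get? d src
      rw [hc] at h
      cases hx : d.get? src
      · rw [hx] at h; simp at h
      · exact ⟨_, rfl⟩
    rw [PySem.Dict.items_insert_of_contains d _ hc]
    rw [pvWgt_empty_eq_sum, pvWgt_empty_eq_sum]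
    rw [PySem.Dict.getD_eq_get?_getD, hval]
    simp only [Option.getD_some]
    have hrepl := pvSumReplace src tgt d.items (by exact hn) val hval
    omega

theorem pvAdjStep_inv (d : PySem.Dict String (List String)) (e : List (String × String))
    (hn : d.keys.Nodup) :
    (pvAdjStep d e).keys.Nodup ∧
      pvWgt PySem.Dict.empty (pvAdjStep d e).items ≤ pvWgt PySem.Dict.empty d.items + 1 := by
  simp only [pvAdjStep]
  split_ifs with h1 h2
  · exact ⟨PySem.Dict.nodup_keys_insert d _ _ hn, pvWgt_empty_insert d _ _ hn⟩
  · exact ⟨hn, by omega⟩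
  · exact ⟨hn, by omega⟩

theorem pvBuildAdj_inv :
    ∀ (edges : List (List (String × String))) (d : PySem.Dict String (List String)),
      d.keys.Nodup →
      (edges.foldl pvAdjStep d).keys.Nodup ∧
        pvWgt PySem.Dict.empty ((edges.foldl pvAdjStep d).items) ≤
          pvWgt PySem.Dict.empty d.items + edges.length := by
  intro edges
  induction edges with
  | nil => intro d hn; exact ⟨hn, by simp⟩
  | cons e rest ih =>
    intro d hn
    obtain ⟨hn1, hw1⟩ := pvAdjStep_inv d e hn
    obtain ⟨hn2, hw2⟩ := ih (pvAdjStep d e) hn1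
    exact ⟨hn2, by simp only [List.foldl_cons, List.length_cons] at *; omega⟩

-- === the adjacency dict reads back the flat filtered edge list ===

theorem pvAdjStep_of_not_ok (d : PySem.Dict String (List String))
    (e : List (String × String)) (h : pvEdgeOk e = false) : pvAdjStep d e = d := by
  
  simp only [pvAdjStep]
  split_ifs with h1 h2
  · exfalso
    simp only [pvEdgeOk, h1, Bool.true_and, Bool.and_eq_false_iff, Bool.not_eq_false',
      beq_iff_eq] at h
    rcases h with h | h
    · exact h2.1 h
    · exact h2.2 h
  · rfl
  · rfl

theorem pvAdjStep_of_ok (d : PySem.Dict String (List String))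
    (e : List (String × String)) (h : pvEdgeOk e = true) :
    pvAdjStep d e = d.insert ((PySem.Dict.mk e).getD "source" "")
      (d.getD ((PySem.Dict.mk e).getD "source" "") [] ++ [(PySem.Dict.mk e).getD "target" ""]) := by
  
  have h' := h
  simp only [pvEdgeOk, Bool.and_eq_true, Bool.not_eq_true', beq_eq_false_iff_ne] at h'
  obtain ⟨⟨hrel, hsrc⟩, htgt⟩ := h'
  simp only [pvAdjStep, hrel, if_true]
  rw [if_pos ⟨hsrc, htgt⟩]

theorem pvAdj_getD (es : List (List (String × String))) :
    ∀ (d : PySem.Dict String (List String)) (x : String),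
      (es.foldl pvAdjStep d).getD x [] =
        d.getD x [] ++ ((pvFEdges es).filter (fun st => st.1 == x)).map Prod.snd := by
  
  induction es with
  | nil => intro d x; simp [pvFEdges]
  | cons e rest ih =>
    intro d x
    rw [List.foldl_cons]
    cases hok : pvEdgeOk e with
    | false =>
      rw [pvAdjStep_of_not_ok d e hok, ih]
      have : pvFEdges (e :: rest) = pvFEdges rest := by
        simp [pvFEdges, List.filter_cons, hok]
      rw [this]
    | true =>
      rw [pvAdjStep_of_ok d e hok, ih]
      have hfe : pvFEdges (e :: rest) =
          ((PySem.Dict.mk e).getD "source" "", (PySem.Dict.mk e).getD "target" "") ::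
            pvFEdges rest := by
        simp [pvFEdges, List.filter_cons, hok]
      rw [hfe, List.filter_cons]
      by_cases hx : (PySem.Dict.mk e).getD "source" "" = x
      · subst hx
        rw [PySem.Dict.getD_insert_self]
        simp
      · rw [PySem.Dict.getD_insert_of_ne _ _ _ (fun hxx => hx hxx.symm)]
        have : ((((PySem.Dict.mk e).getD "source" "", (PySem.Dict.mk e).getD "target" "") :
            String × String).1 == x) = false := by
          simpa using hx
        simp [this]

theorem pvMemAdj (es : List (List (String × String))) (x t : String) :
    t ∈ (pvBuildAdj es).getD x [] ↔ (x, t) ∈ pvFEdges es := by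
  
  rw [pvBuildAdj, pvAdj_getD es PySem.Dict.empty x]
  rw [PySem.Dict.getD_empty]
  simp only [List.nil_append, List.mem_map, List.mem_filter]
  constructor
  · rintro ⟨⟨a, b⟩, ⟨hmem, heq⟩, rfl⟩
    simp only [beq_iff_eq] at heq
    subst heq
    exact hmem
  · intro hmem
    exact ⟨(x, t), ⟨hmem, by simp⟩, rfl⟩

-- === generic insert-fold lookups ===

theorem pvGetFoldInsertConst {α : Type} (key : α → String) (c : Int) :
    ∀ (l : List α) (d : PySem.Dict String Int) (x : String),
      (l.foldl (fun d a => d.insert (key a) c) d).get? x =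
        if x ∈ l.map key then some c else d.get? x := by
  
  intro l
  induction l with
  | nil => intro d x; simp
  | cons a rest ih =>
    intro d x
    rw [List.foldl_cons, ih]
    by_cases hx : x ∈ rest.map key
    · simp [hx]
    · by_cases hk : x = key a
      · subst hk
        simp [hx, PySem.Dict.get?_insert_self]
      · rw [PySem.Dict.get?_insert_of_ne d c hk]
        simp [hx, hk]

theorem pvGetFoldInsertPairs (c : Int) :
    ∀ (l : List (String × Int)), (∀ p ∈ l, p.2 = c) →
      ∀ (d : PySem.Dict String Int) (x : String),
        (l.foldl (fun d p => d.insert p.1 p.2) d).get? x =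
          if x ∈ l.map Prod.fst then some c else d.get? x := by
  
  intro l hl
  induction l with
  | nil => intro d x; simp
  | cons a rest ih =>
    intro d x
    rw [List.foldl_cons]
    rw [ih (fun p hp => hl p (List.mem_cons_of_mem a hp))]
    have ha : a.2 = c := hl a (List.mem_cons_self)
    by_cases hx : x ∈ rest.map Prod.fst
    · simp [hx]
    · by_cases hk : x = a.1
      · subst hk
        simp [hx, ha, PySem.Dict.get?_insert_self]
      · rw [PySem.Dict.get?_insert_of_ne d a.2 hk]
        simp [hx, hk]

-- === pvStepB characterisation ===

theorem pvStepB_get? (adj : PySem.Dict String (List String)) (d : Int) :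
    ∀ (fr : List String) (v : PySem.Dict String Int) (x : String),
      (pvStepB adj d fr v).1.get? x =
        if x ∈ fr ∧ v.contains x = false then some d else v.get? x := by
  intro fr
  induction fr with
  | nil => intro v x; simp [pvStepB]
  | cons node rest ih =>
    intro v x
    simp only [pvStepB]
    cases hc : v.contains node with
    | true =>
      simp only [if_true]
      rw [ih]
      by_cases hx : x ∈ rest ∧ v.contains x = false
      · rw [if_pos hx, if_pos ⟨List.mem_cons_of_mem node hx.1, hx.2⟩]
      · have hnot : ¬(x ∈ node :: rest ∧ v.contains x = false) := by
          rintro ⟨hmem, hcf⟩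
          rcases List.mem_cons.mp hmem with h | h
          · rw [h] at hcf; rw [hcf] at hc; cases hc
          · exact hx ⟨h, hcf⟩
        rw [if_neg hx, if_neg hnot]
    | false =>
      simp only [Bool.false_eq_true, if_false]
      rw [ih]
      by_cases hk : x = node
      · subst hk
        have hcins : (v.insert x d).contains x = true := by
          rw [PySem.Dict.contains_eq_isSome_get?, PySem.Dict.get?_insert_self]; rfl
        have hnot : ¬(x ∈ rest ∧ (v.insert x d).contains x = false) := by
          rintro ⟨_, hq⟩; rw [hcins] at hq; cases hq
        rw [if_neg hnot, PySem.Dict.get?_insert_self,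
          if_pos ⟨List.mem_cons_self, hc⟩]
      · have hcont : (v.insert node d).contains x = v.contains x := by
          rw [PySem.Dict.contains_eq_isSome_get?, PySem.Dict.contains_eq_isSome_get?,
            PySem.Dict.get?_insert_of_ne v d hk]
        rw [hcont, PySem.Dict.get?_insert_of_ne v d hk]
        by_cases hx : x ∈ rest ∧ v.contains x = false
        · rw [if_pos hx, if_pos ⟨List.mem_cons_of_mem node hx.1, hx.2⟩]
        · have hnot : ¬(x ∈ node :: rest ∧ v.contains x = false) := by
            rintro ⟨hmem, hcf⟩
            rcases List.mem_cons.mp hmem with h | h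
            · exact hk h
            · exact hx ⟨h, hcf⟩
          rw [if_neg hx, if_neg hnot]

theorem pvStepB_contains_mono (adj : PySem.Dict String (List String)) (d : Int)
    (fr : List String) (v : PySem.Dict String Int) (y : String)
    (h : v.contains y = true) : (pvStepB adj d fr v).1.contains y = true := by
  
  rw [PySem.Dict.contains_eq_isSome_get?] at h ⊢
  rw [pvStepB_get?]
  by_cases hx : y ∈ fr ∧ v.contains y = false
  · simp [hx]
  · rw [if_neg hx]; exact h

theorem pvStepB_mem_snd (adj : PySem.Dict String (List String)) (d : Int) :
    ∀ (fr : List String) (v : PySem.Dict String Int) (t : String),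
      t ∈ (pvStepB adj d fr v).2 →
      ∃ x ∈ fr, v.contains x = false ∧ t ∈ adj.getD x [] := by
  
  intro fr
  induction fr with
  | nil => intro v t h; simp [pvStepB] at h
  | cons node rest ih =>
    intro v t h
    simp only [pvStepB] at h
    cases hc : v.contains node with
    | true =>
      rw [hc] at h
      simp only [if_true] at h
      obtain ⟨x, hx, hxc, hxa⟩ := ih v t h
      exact ⟨x, List.mem_cons_of_mem node hx, hxc, hxa⟩
    | false =>
      rw [hc] at h
      simp only [Bool.false_eq_true, if_false, List.mem_append] at h
      rcases h with h | h
      · have := List.mem_filter.mp h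
        exact ⟨node, List.mem_cons_self, hc, this.1⟩
      · obtain ⟨x, hx, hxc, hxa⟩ := ih (v.insert node d) t h
        by_cases hk : x = node
        · subst hk
          rw [PySem.Dict.contains_eq_isSome_get?, PySem.Dict.get?_insert_self] at hxc
          simp at hxc
        · have : v.contains x = false := by
            rw [PySem.Dict.contains_eq_isSome_get?] at hxc ⊢
            rw [PySem.Dict.get?_insert_of_ne v d hk] at hxc
            exact hxc
          exact ⟨x, List.mem_cons_of_mem node hx, this, hxa⟩

theorem pvStepB_mem_snd_of (adj : PySem.Dict String (List String)) (d : Int) :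
    ∀ (fr : List String) (v : PySem.Dict String Int) (x t : String),
      x ∈ fr → v.contains x = false → t ∈ adj.getD x [] →
      (pvStepB adj d fr v).1.contains t = false →
      t ∈ (pvStepB adj d fr v).2 := by
  
  intro fr
  induction fr with
  | nil => intro v x t h; simp at h
  | cons node rest ih =>
    intro v x t hx hxc hxa hfin
    simp only [pvStepB]
    cases hc : v.contains node with
    | true =>
      simp only [if_true]
      have hxne : x ≠ node := fun h => by rw [h, hc] at hxc; cases hxc
      have hx' : x ∈ rest := by
        rcases List.mem_cons.mp hx with h | h
        · exact absurd h hxne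
        · exact h
      apply ih v x t hx' hxc hxa
      simpa only [pvStepB, hc, if_true] using hfin
    | false =>
      simp only [Bool.false_eq_true, if_false, List.mem_append]
      have hfin' : (pvStepB adj d rest (v.insert node d)).1.contains t = false := by
        simpa only [pvStepB, hc, Bool.false_eq_true, if_false] using hfin
      by_cases hk : x = node
      · subst hk
        left
        apply List.mem_filter.mpr
        refine ⟨hxa, ?_⟩
        have : (v.insert x d).contains t = false := by
          by_contra hcon
          have : (v.insert x d).contains t = true := by
            cases hx2 : (v.insert x d).contains t
            · exact absurd hx2 hcon
            · rfl
          have := pvStepB_contains_mono adj d rest (v.insert x d) t this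
          rw [this] at hfin'
          cases hfin'
        simp [this]
      · right
        have hx' : x ∈ rest := by
          rcases List.mem_cons.mp hx with h | h
          · exact absurd h hk
          · exact h
        have hxc' : (v.insert node d).contains x = false := by
          rw [PySem.Dict.contains_eq_isSome_get?, PySem.Dict.get?_insert_of_ne v d hk]
          rw [PySem.Dict.contains_eq_isSome_get?] at hxc
          exact hxc
        exact ih (v.insert node d) x t hx' hxc' hxa hfin' 

theorem pvStepB_all_visited (adj : PySem.Dict String (List String)) (d : Int) :
    ∀ (fr : List String) (v : PySem.Dict String Int),
      (∀ x ∈ fr, v.contains x = true) → pvStepB adj d fr v = (v, []) := by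
  
  intro fr
  induction fr with
  | nil => intro v _; rfl
  | cons node rest ih =>
    intro v h
    simp only [pvStepB, h node List.mem_cons_self, if_true]
    exact ih v (fun x hx => h x (List.mem_cons_of_mem node hx))

theorem pvBfsB_nil_frontier (adj : PySem.Dict String (List String)) (g : Nat) (r : Int)
    (v : PySem.Dict String Int) : pvBfsB adj g [] r v = v := by
  cases g <;> rfl

theorem pvBfsB_all_visited (adj : PySem.Dict String (List String)) :
    ∀ (g : Nat) (fr : List String) (r : Int) (v : PySem.Dict String Int),
      (∀ x ∈ fr, v.contains x = true) → pvBfsB adj g fr r v = v := by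
  
  intro g
  induction g with
  | zero => intro fr r v _; rfl
  | succ g ih =>
    intro fr r v h
    cases fr with
    | nil => rfl
    | cons a l =>
      show pvBfsB adj g (pvStepB adj r (a :: l) v).2 (r + 1) (pvStepB adj r (a :: l) v).1 = v
      rw [pvStepB_all_visited adj r (a :: l) v h]
      exact pvBfsB_nil_frontier adj g (r + 1) v

-- === pvNewly characterisation ===

theorem pvNewly_get? (fedges : List (String × String)) (dist : PySem.Dict String Int)
    (r : Int) (t : String) :
    (pvNewly fedges dist r).get? t =
      if t ∈ (fedges.filter (fun st => dist.get? st.1 == some r && !(dist.contains st.2))).map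
          Prod.snd then some (r + 1) else none := by
  unfold pvNewly
  rw [pvGetFoldInsertConst Prod.snd (r + 1)]
  rw [PySem.Dict.get?_empty]

theorem pvNewly_mem_iff (fedges : List (String × String)) (dist : PySem.Dict String Int)
    (r : Int) (t : String) :
    (pvNewly fedges dist r).contains t = true ↔
      ∃ s, (s, t) ∈ fedges ∧ dist.get? s = some r ∧ dist.contains t = false := by
  rw [PySem.Dict.contains_eq_isSome_get?, pvNewly_get?]
  by_cases hm : t ∈ (fedges.filter
      (fun st => dist.get? st.1 == some r && !(dist.contains st.2))).map Prod.snd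
  · rw [if_pos hm]
    constructor
    · intro _
      obtain ⟨⟨a, b⟩, hmem, rfl⟩ := List.mem_map.mp hm
      obtain ⟨hin, hcond⟩ := List.mem_filter.mp hmem
      simp only [Bool.and_eq_true, beq_iff_eq, Bool.not_eq_true'] at hcond
      exact ⟨a, hin, hcond.1, hcond.2⟩
    · intro _; rfl
  · rw [if_neg hm]
    constructor
    · intro h; simp at h
    · rintro ⟨s, hin, hget, hcon⟩
      exact absurd (List.mem_map.mpr
        ⟨(s, t), List.mem_filter.mpr ⟨hin, by simp [hget, hcon]⟩, rfl⟩) hm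

theorem pvNewly_items_nil (fedges : List (String × String)) (dist : PySem.Dict String Int)
    (r : Int) (h : ∀ t, (pvNewly fedges dist r).contains t = false) :
    (pvNewly fedges dist r).items = [] := by
  
  cases hi : (pvNewly fedges dist r).items with
  | nil => rfl
  | cons p rest =>
    exfalso
    have hker : p.1 ∈ (pvNewly fedges dist r).keys := by
      show p.1 ∈ (pvNewly fedges dist r).items.map Prod.fst
      rw [hi]; exact List.mem_map_of_mem List.mem_cons_self
    have := h p.1
    rw [PySem.Dict.contains_eq_decide_mem_keys] at this
    simp [hker] at this

theorem pvNewly_nodup (fedges : List (String × String)) (dist : PySem.Dict String Int)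
    (r : Int) : (pvNewly fedges dist r).keys.Nodup := by
  unfold pvNewly
  exact PySem.Dict.nodup_keys_foldl_insert_key _ Prod.snd
    (fun _ _ => r + 1) PySem.Dict.empty PySem.Dict.nodup_keys_empty

theorem pvNewly_val (fedges : List (String × String)) (dist : PySem.Dict String Int)
    (r : Int) (p : String × Int) (hp : p ∈ (pvNewly fedges dist r).items) : p.2 = r + 1 := by
  obtain ⟨k, w⟩ := p
  have hget := PySem.Dict.get?_of_mem_items _ hp (pvNewly_nodup fedges dist r)
  rw [pvNewly_get?] at hget
  by_cases hm : k ∈ (fedges.filter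
      (fun st => dist.get? st.1 == some r && !(dist.contains st.2))).map Prod.snd
  · rw [if_pos hm] at hget
    cases hget; rfl
  · rw [if_neg hm] at hget
    cases hget

theorem pvFilterLenLe {α : Type} (p q : α → Bool) :
    ∀ (l : List α), (∀ a ∈ l, q a = true → p a = true) →
      (l.filter q).length ≤ (l.filter p).length := by
  intro l
  induction l with
  | nil => intro _; simp
  | cons a rest ih =>
    intro himp
    have ihr := ih (fun b hb => himp b (List.mem_cons_of_mem a hb))
    rw [List.filter_cons, List.filter_cons]
    cases hqa : q a
    · cases hpa : p a
      · simpa using ihr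
      · simp only [Bool.false_eq_true, if_false, if_true, List.length_cons]
        omega
    · rw [himp a List.mem_cons_self hqa]
      simp only [if_true, List.length_cons]
      omega

theorem pvFilterLenLt {α : Type} (p q : α → Bool) :
    ∀ (l : List α), (∀ a ∈ l, q a = true → p a = true) →
      ∀ a0, a0 ∈ l → p a0 = true → q a0 = false →
      (l.filter q).length < (l.filter p).length := by
  intro l
  induction l with
  | nil => intro _ a0 h0 _ _; cases h0
  | cons a rest ih =>
    intro himp a0 h0 hp0 hq0
    rcases List.mem_cons.mp h0 with rfl | h0'
    · rw [List.filter_cons, List.filter_cons, hp0, hq0]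
      simp only [if_true, Bool.false_eq_true, if_false, List.length_cons]
      have := pvFilterLenLe p q rest (fun b hb => himp b (List.mem_cons_of_mem a0 hb))
      omega
    · have hlt := ih (fun b hb => himp b (List.mem_cons_of_mem a hb)) a0 h0' hp0 hq0
      rw [List.filter_cons, List.filter_cons]
      cases hqa : q a
      · cases hpa : p a
        · simpa using hlt
        · simp only [Bool.false_eq_true, if_false, if_true, List.length_cons]
          omega
      · rw [himp a List.mem_cons_self hqa]
        simp only [if_true, List.length_cons]
        omega

theorem pvMainTerm (fedges : List (String × String)) :
    ∀ (f : Nat) (v dist : PySem.Dict String Int) (r : Int),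
      (∀ x k, v.get? x = some k → k < r) →
      (∀ y, dist.get? y = v.get? y) →
      ∀ x, v.get? x = (pvRelax fedges f dist r).get? x := by
  intro f v dist r hi hdist x
  have hnil : (pvNewly fedges dist r).items = [] := by
    apply pvNewly_items_nil
    intro t
    cases hct : (pvNewly fedges dist r).contains t with
    | false => rfl
    | true =>
      exfalso
      obtain ⟨s, _, hget, _⟩ := (pvNewly_mem_iff fedges dist r t).mp hct
      rw [hdist s] at hget
      have := hi s r hget
      omega
  cases f with
  | zero => exact (hdist x).symm
  | succ f =>
    simp only [pvRelax]
    rw [if_pos hnil]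
    exact (hdist x).symm

theorem pvMain (adj : PySem.Dict String (List String)) (fedges : List (String × String))
    (hadj : ∀ x t, t ∈ adj.getD x [] ↔ (x, t) ∈ fedges)
    (hn : (adj.items.map Prod.fst).Nodup) :
    ∀ (g f : Nat) (frontier : List String) (v dist : PySem.Dict String Int) (r : Int),
      frontier.length + pvWgt v adj.items ≤ g →
      (fedges.filter (fun st => !(dist.contains st.2))).length < f →
      (∀ x k, v.get? x = some k → k < r) →
      (∀ x, dist.get? x = (pvStepB adj r frontier v).1.get? x) →
      ∀ x, (pvBfsB adj g frontier r v).get? x = (pvRelax fedges f dist r).get? x := by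
  intro g
  induction g with
  | zero =>
    intro f frontier v dist r hg hf hi hdist x
    have hfr : frontier = [] := by
      cases frontier with
      | nil => rfl
      | cons a l => simp [List.length_cons] at hg
    subst hfr
    rw [pvBfsB_nil_frontier]
    exact pvMainTerm fedges f v dist r hi (fun y => (hdist y).trans rfl) x
  | succ g ih =>
    intro f frontier v dist r hg hf hi hdist x
    cases frontier with
    | nil =>
      rw [pvBfsB_nil_frontier]
      exact pvMainTerm fedges f v dist r hi (fun y => (hdist y).trans rfl) x
    | cons a fr' =>
      have hstep : pvBfsB adj (g + 1) (a :: fr') r v =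
          pvBfsB adj g (pvStepB adj r (a :: fr') v).2 (r + 1) (pvStepB adj r (a :: fr') v).1 :=
        rfl
      rw [hstep]
      have hkey : ∀ t, (pvNewly fedges dist r).contains t = true ↔
          (t ∈ (pvStepB adj r (a :: fr') v).2 ∧
            (pvStepB adj r (a :: fr') v).1.contains t = false) := by
        intro t
        rw [pvNewly_mem_iff]
        constructor
        · rintro ⟨s, hst, hget, hcon⟩
          have hgv : (pvStepB adj r (a :: fr') v).1.get? s = some r := by
            rw [← hdist s]; exact hget
          rw [pvStepB_get?] at hgv
          by_cases hsf : s ∈ a :: fr' ∧ v.contains s = false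
          · rw [if_pos hsf] at hgv
            have hcv' : (pvStepB adj r (a :: fr') v).1.contains t = false := by
              rw [PySem.Dict.contains_eq_isSome_get?, ← hdist t]
              rw [PySem.Dict.contains_eq_isSome_get?] at hcon
              exact hcon
            exact ⟨pvStepB_mem_snd_of adj r (a :: fr') v s t hsf.1 hsf.2
              ((hadj s t).mpr hst) hcv', hcv'⟩
          · rw [if_neg hsf] at hgv
            have := hi s r hgv
            omega
        · rintro ⟨hmem, hcf⟩
          obtain ⟨s, hs, hsc, hsa⟩ := pvStepB_mem_snd adj r (a :: fr') v t hmem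
          have hgv : (pvStepB adj r (a :: fr') v).1.get? s = some r := by
            rw [pvStepB_get?, if_pos ⟨hs, hsc⟩]
          refine ⟨s, (hadj s t).mp hsa, ?_, ?_⟩
          · rw [hdist s]; exact hgv
          · rw [PySem.Dict.contains_eq_isSome_get?] at hcf ⊢
            rw [hdist t]
            exact hcf
      by_cases hni : (pvNewly fedges dist r).items = []
      · have hall : ∀ t ∈ (pvStepB adj r (a :: fr') v).2,
            (pvStepB adj r (a :: fr') v).1.contains t = true := by
          intro t ht
          cases hct : (pvStepB adj r (a :: fr') v).1.contains t with
          | true => rfl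
          | false =>
            exfalso
            have hcc : (pvNewly fedges dist r).contains t = true := (hkey t).mpr ⟨ht, hct⟩
            have hde : pvNewly fedges dist r = PySem.Dict.empty :=
              PySem.Dict.ext (by rw [hni]; rfl)
            rw [hde, PySem.Dict.contains_empty] at hcc
            cases hcc
        rw [pvBfsB_all_visited adj g _ (r + 1) _ hall]
        cases f with
        | zero => omega
        | succ f =>
          simp only [pvRelax]
          rw [if_pos hni]
          exact (hdist x).symm
      · obtain ⟨f, rfl⟩ : ∃ f', f = f' + 1 := ⟨f - 1, by omega⟩
        simp only [pvRelax]
        rw [if_neg hni]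
        have hU : ∀ y, ((pvNewly fedges dist r).items.foldl
            (fun d p => d.insert p.1 p.2) dist).get? y =
            if y ∈ (pvNewly fedges dist r).items.map Prod.fst then some (r + 1)
            else dist.get? y :=
          fun y => pvGetFoldInsertPairs (r + 1) _
            (fun p hp => pvNewly_val fedges dist r p hp) dist y
        have hUkeys : ∀ y, (y ∈ (pvNewly fedges dist r).items.map Prod.fst) ↔
            (pvNewly fedges dist r).contains y = true := by
          intro y
          rw [PySem.Dict.contains_eq_decide_mem_keys]
          constructor
          · intro hy; exact decide_eq_true hy
          · intro hy; exact of_decide_eq_true hy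
        have hdist' : ∀ y, ((pvNewly fedges dist r).items.foldl
            (fun d p => d.insert p.1 p.2) dist).get? y =
            (pvStepB adj (r + 1) (pvStepB adj r (a :: fr') v).2
              (pvStepB adj r (a :: fr') v).1).1.get? y := by
          intro y
          rw [hU, pvStepB_get?]
          have hmemiff := (hUkeys y).trans (hkey y)
          by_cases hy : y ∈ (pvStepB adj r (a :: fr') v).2 ∧
              (pvStepB adj r (a :: fr') v).1.contains y = false
          · rw [if_pos (hmemiff.mpr hy), if_pos hy]
          · rw [if_neg (fun hmem => hy (hmemiff.mp hmem)), if_neg hy]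
            exact hdist y
        have hi' : ∀ y k, (pvStepB adj r (a :: fr') v).1.get? y = some k → k < r + 1 := by
          intro y k hk
          rw [pvStepB_get?] at hk
          by_cases hy : y ∈ a :: fr' ∧ v.contains y = false
          · rw [if_pos hy] at hk; cases hk; omega
          · rw [if_neg hy] at hk; have := hi y k hk; omega
        have hw := pvStepB_wgt adj r (a :: fr') v hn
        have hg' : (pvStepB adj r (a :: fr') v).2.length +
            pvWgt (pvStepB adj r (a :: fr') v).1 adj.items ≤ g := by
          have hl : (a :: fr').length = fr'.length + 1 := rfl
          omega
        have hmono : ∀ st ∈ fedges, (!(((pvNewly fedges dist r).items.foldl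
            (fun d p => d.insert p.1 p.2) dist).contains st.2)) = true →
            (!(dist.contains st.2)) = true := by
          intro st _ hq
          simp only [Bool.not_eq_true'] at hq ⊢
          rw [PySem.Dict.contains_eq_isSome_get?] at hq ⊢
          rw [hU st.2] at hq
          by_cases hm : st.2 ∈ (pvNewly fedges dist r).items.map Prod.fst
          · rw [if_pos hm] at hq; simp at hq
          · rw [if_neg hm] at hq; exact hq
        obtain ⟨p0, hp0⟩ : ∃ p0, p0 ∈ (pvNewly fedges dist r).items := by
          cases hii : (pvNewly fedges dist r).items with
          | nil => exact absurd hii hni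
          | cons q l => exact ⟨q, List.mem_cons_self⟩
        have hp0c : (pvNewly fedges dist r).contains p0.1 = true := by
          rw [PySem.Dict.contains_eq_decide_mem_keys]
          exact decide_eq_true (List.mem_map_of_mem hp0)
        obtain ⟨s0, hs0f, hs0get, hs0con⟩ := (pvNewly_mem_iff fedges dist r p0.1).mp hp0c
        have hfU : (fedges.filter (fun st => !(((pvNewly fedges dist r).items.foldl
            (fun d p => d.insert p.1 p.2) dist).contains st.2))).length <
            (fedges.filter (fun st => !(dist.contains st.2))).length := by
          apply pvFilterLenLt _ _ fedges hmono (s0, p0.1) hs0f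
          · simp [hs0con]
          · have hcc : ((pvNewly fedges dist r).items.foldl
                (fun d p => d.insert p.1 p.2) dist).contains p0.1 = true := by
              rw [PySem.Dict.contains_eq_isSome_get?, hU,
                if_pos (List.mem_map_of_mem hp0)]
              rfl
            simp [hcc]
        exact ih (f + 1 - 1) _ _ _ (r + 1) hg' (by omega) hi' hdist' x

theorem pvStepB_items (adj : PySem.Dict String (List String)) (d : Int) :
    ∀ (fr : List String) (v : PySem.Dict String Int),
      v.keys.Nodup → v.items.Pairwise (fun p q => p.2 ≤ q.2) → (∀ p ∈ v.items, p.2 ≤ d) →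
      (pvStepB adj d fr v).1.keys.Nodup ∧
        (pvStepB adj d fr v).1.items.Pairwise (fun p q => p.2 ≤ q.2) ∧
        ∀ p ∈ (pvStepB adj d fr v).1.items, p.2 ≤ d := by
  intro fr
  induction fr with
  | nil => intro v h1 h2 h3; exact ⟨h1, h2, h3⟩
  | cons node rest ih =>
    intro v h1 h2 h3
    simp only [pvStepB]
    cases hc : v.contains node with
    | true => simp only [if_true]; exact ih v h1 h2 h3
    | false =>
      simp only [Bool.false_eq_true, if_false]
      apply ih
      · exact PySem.Dict.nodup_keys_insert v node d h1
      · rw [PySem.Dict.items_insert_of_not_contains v _ hc]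
        apply List.pairwise_append.mpr
        refine ⟨h2, List.pairwise_singleton _ _, ?_⟩
        intro p hp q hq
        have : q = (node, d) := by simpa using hq
        rw [this]
        exact h3 p hp
      · intro p hp
        rw [PySem.Dict.items_insert_of_not_contains v _ hc] at hp
        rcases List.mem_append.mp hp with h | h
        · exact h3 p h
        · have : p = (node, d) := by simpa using h
          rw [this]

theorem pvBfsB_inv (adj : PySem.Dict String (List String)) :
    ∀ (g : Nat) (fr : List String) (r : Int) (v : PySem.Dict String Int),
      v.keys.Nodup → v.items.Pairwise (fun p q => p.2 ≤ q.2) → (∀ p ∈ v.items, p.2 < r) →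
      (pvBfsB adj g fr r v).keys.Nodup ∧
        (pvBfsB adj g fr r v).items.Pairwise (fun p q => p.2 ≤ q.2) := by
  intro g
  induction g with
  | zero => intro fr r v h1 h2 _; exact ⟨h1, h2⟩
  | succ g ih =>
    intro fr r v h1 h2 h3
    cases fr with
    | nil => exact ⟨h1, h2⟩
    | cons a l =>
      have hs := pvStepB_items adj r (a :: l) v h1 h2 (fun p hp => le_of_lt (h3 p hp))
      exact ih _ (r + 1) _ hs.1 hs.2.1 (fun p hp => lt_of_le_of_lt (hs.2.2 p hp) (by omega))

theorem pvRelax_nodup (fedges : List (String × String)) :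
    ∀ (f : Nat) (dist : PySem.Dict String Int) (r : Int),
      dist.keys.Nodup → (pvRelax fedges f dist r).keys.Nodup := by
  intro f
  induction f with
  | zero => intro dist r h; exact h
  | succ f ih =>
    intro dist r h
    simp only [pvRelax]
    split_ifs with hni
    · exact h
    · exact ih _ _ (PySem.Dict.nodup_keys_foldl_insert_key _ Prod.fst (fun _ p => p.2) dist h)

theorem pvDist0_get? (idStem : String) (nbi : PySem.Dict String (PySem.Dict String String))
    (x : String) :
    (pvDist0 idStem nbi).get? x = if x ∈ pvSeeds idStem nbi then some 0 else none := by
  unfold pvDist0 pvSeeds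
  rw [pvGetFoldInsertConst Prod.fst 0]
  rw [PySem.Dict.get?_empty]

theorem pvDist0_nodup (idStem : String) (nbi : PySem.Dict String (PySem.Dict String String)) :
    (pvDist0 idStem nbi).keys.Nodup := by
  unfold pvDist0
  exact PySem.Dict.nodup_keys_foldl_insert_key _ Prod.fst
    (fun _ _ => 0) PySem.Dict.empty PySem.Dict.nodup_keys_empty

theorem pvDist0_items_nil_iff (idStem : String)
    (nbi : PySem.Dict String (PySem.Dict String String)) :
    (pvDist0 idStem nbi).items = [] ↔ pvSeeds idStem nbi = [] := by
  constructor
  · intro h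
    cases hf : (nbi.items.filter (pvSeedPred idStem)) with
    | nil => simp [pvSeeds, hf]
    | cons a l =>
      exfalso
      have hmem : a.1 ∈ pvSeeds idStem nbi := by
        unfold pvSeeds
        rw [hf]
        exact List.mem_map_of_mem List.mem_cons_self
      have hsome : (pvDist0 idStem nbi).get? a.1 = some 0 := by
        rw [pvDist0_get?, if_pos hmem]
      have h1 : (pvDist0 idStem nbi).contains a.1 = true := by
        rw [PySem.Dict.contains_eq_isSome_get?, hsome]; rfl
      have h2 : (pvDist0 idStem nbi).contains a.1 = false := by
        rw [PySem.Dict.contains_eq_decide_mem_keys]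
        have hk : (pvDist0 idStem nbi).keys = [] := by
          show (pvDist0 idStem nbi).items.map (·.1) = []
          rw [h]; rfl
        rw [hk]
        simp
      rw [h1] at h2
      cases h2
  · intro h
    unfold pvSeeds at h
    have hf : nbi.items.filter (pvSeedPred idStem) = [] := List.map_eq_nil_iff.mp h
    unfold pvDist0
    rw [hf]
    rfl

theorem pvFallbackA_eq (s : String) (nbi : PySem.Dict String (PySem.Dict String String)) :
    ∀ (l : List (String × Int)),
      pvFallbackA s nbi l =
        ((l.filter (fun p => pvMatchPred s nbi p.1)).map (fun p => max 1 p.2)).head? := by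
  intro l
  induction l with
  | nil => rfl
  | cons p rest ih =>
    obtain ⟨nid, depth⟩ := p
    cases hm : pvMatchPred s nbi nid
    · simp [pvFallbackA, List.filter_cons, hm, ih]
    · simp [pvFallbackA, List.filter_cons, hm]

theorem pvMin?_isSome_cons (x : Int) (xs : List Int) :
    (PySem.List.min? (x :: xs) (fun t => t)).isSome := by
  unfold PySem.List.min?
  induction xs generalizing x with
  | nil => simp
  | cons y ys ih => simp only [List.foldl_cons]; split <;> exact ih _

theorem pvMin?_isSome {l : List Int} (h : l ≠ []) :
    (PySem.List.min? l (fun x => x)).isSome := by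
  cases l with
  | nil => exact absurd rfl h
  | cons x xs => exact pvMin?_isSome_cons x xs

theorem pvValue_eq (visited dist : PySem.Dict String Int)
    (nbi : PySem.Dict String (PySem.Dict String String))
    (hpt : ∀ x, visited.get? x = dist.get? x)
    (hnv : visited.keys.Nodup) (hnd : dist.keys.Nodup)
    (hsort : visited.items.Pairwise (fun p q => p.2 ≤ q.2)) (sid : String) :
    (if visited.contains sid then max 1 (visited.getD sid 0)
     else (pvFallbackA (pvStem sid) nbi visited.items).getD 1) =
      pvDepthForB sid dist nbi := by
  
  have hcons : visited.contains sid = dist.contains sid := by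
    rw [PySem.Dict.contains_eq_isSome_get?, PySem.Dict.contains_eq_isSome_get?, hpt]
  unfold pvDepthForB
  cases hc : dist.contains sid with
  | true =>
    rw [hcons, hc]
    simp only [if_true]
    rw [PySem.Dict.getD_eq_get?_getD, PySem.Dict.getD_eq_get?_getD, hpt]
  | false =>
    rw [hcons, hc]
    simp only [Bool.false_eq_true, if_false]
    have hperm : visited.items.Perm dist.items := by
      apply (List.perm_ext_iff_of_nodup (List.Nodup.of_map Prod.fst hnv)
        (List.Nodup.of_map Prod.fst hnd)).mpr
      intro p
      obtain ⟨k, w⟩ := p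
      rw [← PySem.Dict.get?_eq_some_iff_mem_items visited k w hnv,
        ← PySem.Dict.get?_eq_some_iff_mem_items dist k w hnd, hpt]
    rw [pvFallbackA_eq]
    have hpermC : ((visited.items.filter (fun p => pvMatchPred (pvStem sid) nbi p.1)).map
          (fun p => max 1 p.2)).Perm
        ((dist.items.filter (fun p => pvMatchPred (pvStem sid) nbi p.1)).map
          (fun p => max 1 p.2)) :=
      (hperm.filter _).map _
    have hsortA : ((visited.items.filter (fun p => pvMatchPred (pvStem sid) nbi p.1)).map
        (fun p => max 1 p.2)).Pairwise (· ≤ ·) := by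
      apply List.pairwise_map.mpr
      apply List.Pairwise.imp (fun h => max_le_max le_rfl h)
      exact hsort.filter _
    cases hcand : (dist.items.filter (fun p => pvMatchPred (pvStem sid) nbi p.1)).map
        (fun p => max 1 p.2) with
    | nil =>
      rw [hcand] at hpermC
      rw [List.perm_nil.mp hpermC]
      rfl
    | cons c0 cs =>
      rw [hcand] at hpermC
      have hcne : ¬((c0 :: cs : List Int) = []) := by simp
      simp only [hcand, if_neg hcne]
      obtain ⟨m, hm⟩ := Option.isSome_iff_exists.mp
        (pvMin?_isSome (l := c0 :: cs) (by simp))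
      rw [hm]
      have hmmem : m ∈ c0 :: cs := PySem.List.min?_mem hm
      have hmmin : ∀ y ∈ c0 :: cs, m ≤ y := by
        intro y hy
        exact PySem.List.min?_isMin hm y hy
      cases hcA : (visited.items.filter (fun p => pvMatchPred (pvStem sid) nbi p.1)).map
          (fun p => max 1 p.2) with
      | nil =>
        rw [hcA] at hpermC
        have := List.perm_nil.mp hpermC.symm
        cases this
      | cons h0 t0 =>
        rw [hcA] at hpermC hsortA
        have hh0 : h0 ∈ c0 :: cs := hpermC.mem_iff.mp List.mem_cons_self
        have hmA : m ∈ h0 :: t0 := hpermC.mem_iff.mpr hmmem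
        have hle1 : m ≤ h0 := hmmin h0 hh0
        have hle2 : h0 ≤ m := by
          rcases List.mem_cons.mp hmA with h | h
          · omega
          · exact (List.pairwise_cons.mp hsortA).1 m h
        have : h0 = m := by omega
        simp [this]

-- === assembling the two ports on the non-trivial path ===
theorem pvCore (subs : List String) (nbi : PySem.Dict String (PySem.Dict String String))
    (edges : List (List (String × String))) (idStem : String)
    (h2 : pvSeeds idStem nbi ≠ []) :
    pvResultA subs
        (pvBfsA (pvBuildAdj edges) ((pvSeeds idStem nbi).length + edges.length)
          ((pvSeeds idStem nbi).map (fun s => (s, (0 : Int)))) PySem.Dict.empty) nbi =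
      (subs.foldl (fun r sid => r.insert sid (pvDepthForB sid
          (pvRelax (pvFEdges edges) ((pvFEdges edges).length + 1) (pvDist0 idStem nbi) 0) nbi))
        PySem.Dict.empty).items := by
  obtain ⟨hadjn, hadjw⟩ := pvBuildAdj_inv edges PySem.Dict.empty PySem.Dict.nodup_keys_empty
  have hadjw' : pvWgt PySem.Dict.empty (pvBuildAdj edges).items ≤ edges.length := by
    simpa [pvBuildAdj,
      show pvWgt PySem.Dict.empty (PySem.Dict.empty :
        PySem.Dict String (List String)).items = 0 from rfl] using hadjw
  have hadjn' : (pvBuildAdj edges).keys.Nodup := by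
    simpa [pvBuildAdj] using hadjn
  have hAB := pvBfs_eq (pvBuildAdj edges) hadjn'
    ((pvSeeds idStem nbi).length + edges.length) ((pvSeeds idStem nbi).length + edges.length)
    (pvSeeds idStem nbi) 0 PySem.Dict.empty (by omega) (by omega)
  rw [hAB]
  have hd0 : ∀ x, (pvDist0 idStem nbi).get? x =
      (pvStepB (pvBuildAdj edges) 0 (pvSeeds idStem nbi) PySem.Dict.empty).1.get? x := by
    intro x
    rw [pvDist0_get?, pvStepB_get?]
    by_cases hx : x ∈ pvSeeds idStem nbi
    · rw [if_pos hx, if_pos ⟨hx, PySem.Dict.contains_empty x⟩]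
    · rw [if_neg hx, if_neg (fun hh => hx hh.1), PySem.Dict.get?_empty]
  have hpt := pvMain (pvBuildAdj edges) (pvFEdges edges) (fun x t => pvMemAdj edges x t)
    hadjn' ((pvSeeds idStem nbi).length + edges.length) ((pvFEdges edges).length + 1)
    (pvSeeds idStem nbi) PySem.Dict.empty (pvDist0 idStem nbi) 0
    (by omega)
    (by have := List.length_filter_le
          (fun st => !((pvDist0 idStem nbi).contains st.2)) (pvFEdges edges); omega)
    (by intro x k hk; rw [PySem.Dict.get?_empty] at hk; cases hk)
    hd0
  have hinv := pvBfsB_inv (pvBuildAdj edges) ((pvSeeds idStem nbi).length + edges.length)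
    (pvSeeds idStem nbi) 0 PySem.Dict.empty PySem.Dict.nodup_keys_empty
    List.Pairwise.nil (fun p hp => absurd hp List.not_mem_nil)
  have hdn := pvRelax_nodup (pvFEdges edges) ((pvFEdges edges).length + 1)
    (pvDist0 idStem nbi) 0 (pvDist0_nodup idStem nbi)
  unfold pvResultA
  congr 1
  apply PySem.List.foldl_congr_mem
  intro acc sid _
  have hv := pvValue_eq _ _ nbi hpt hinv.1 hdn hinv.2 sid
  by_cases hcs : (pvBfsB (pvBuildAdj edges) ((pvSeeds idStem nbi).length + edges.length)
      (pvSeeds idStem nbi) 0 PySem.Dict.empty).contains sid = true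
  · rw [if_pos hcs]
    rw [if_pos hcs] at hv
    rw [hv]
  · rw [if_neg hcs]
    rw [if_neg hcs] at hv
    rw [hv]

-- ===== VERDICT (by name: the statement is the Claim_ definition above) =====
theorem compute_contamination_depths_py_spec : Claim_equal_compute_contamination_depths_py := by
  
  intro pid subs snapshot _ _
  unfold Spec_compute_contamination_depths_py
  unfold compute_contamination_depths_py compute_contamination_depths_py_alt
  by_cases h1 : snapshot = [] ∨ subs = []
  · simp only [if_pos h1]
  · simp only [if_neg h1]
    by_cases h2 : pvSeeds (pvStem pid)
        (pvNodesById ((PySem.Dict.mk snapshot).getD "nodes" [])) = []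
    · rw [if_pos h2, if_pos ((pvDist0_items_nil_iff _ _).mpr h2)]
    · rw [if_neg h2, if_neg (fun hh => h2 ((pvDist0_items_nil_iff _ _).mp hh))]
      exact pvCore subs (pvNodesById ((PySem.Dict.mk snapshot).getD "nodes" []))
        ((PySem.Dict.mk snapshot).getD "edges" []) (pvStem pid) h2
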